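-- pv_equiv track=rewrite | github.com/sloisel/c64-3d | asm/gen_steve.py | generate_box_faces
-- ===== SOURCE A (Python) =====
-- def generate_box_faces(base_vertex, flip_winding=False):
--     """Generate 12 triangles for a box starting at base_vertex."""
--     B = base_vertex
--
--     faces = [
--         # Front face (z = z0)
--         (B+0, B+1, B+5, "front"),
--         (B+0, B+5, B+4, "front"),
--         # Back face (z = z1)
--         (B+2, B+3, B+7, "back"),
--         (B+2, B+7, B+6, "back"),
--         # Top face (y = y1)
--         (B+0, B+3, B+2, "top"),
--         (B+0, B+2, B+1, "top"),
--         # Bottom face (y = y0)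
--         (B+4, B+5, B+6, "bottom"),
--         (B+4, B+6, B+7, "bottom"),
--         # Right face (x = x1)
--         (B+1, B+2, B+6, "right"),
--         (B+1, B+6, B+5, "right"),
--         # Left face (x = x0)
--         (B+0, B+4, B+7, "left"),
--         (B+0, B+7, B+3, "left"),
--     ]
--
--     if flip_winding:
--         faces = [(i, k, j, name) for (i, j, k, name) in faces]
--
--     return faces
-- ===== SOURCE B (Python) =====
-- def generate_box_faces(base_vertex, flip_winding=False):
--     """Generate 12 triangles for a box starting at base_vertex."""
--     B = base_vertex
--     quads = [
--         (0, 1, 5, 4, "front"),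
--         (2, 3, 7, 6, "back"),
--         (0, 3, 2, 1, "top"),
--         (4, 5, 6, 7, "bottom"),
--         (1, 2, 6, 5, "right"),
--         (0, 4, 7, 3, "left"),
--     ]
--     faces = []
--     for (a, b, c, d, name) in quads:
--         if flip_winding:
--             faces.append((B + a, B + c, B + b, name))
--             faces.append((B + a, B + d, B + c, name))
--         else:
--             faces.append((B + a, B + b, B + c, name))
--             faces.append((B + a, B + c, B + d, name))
--     return faces
-- ===== Notes on version B (the rewrite author's own statement) =====
-- stated objective: simpler
-- what changed: B replaces the hard-coded list of 12 triangle tuples (plus a second flip pass) with six quads triangulated by a fan in a single loop that applies the winding choice as it emits each triangle.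
import Mathlib
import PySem

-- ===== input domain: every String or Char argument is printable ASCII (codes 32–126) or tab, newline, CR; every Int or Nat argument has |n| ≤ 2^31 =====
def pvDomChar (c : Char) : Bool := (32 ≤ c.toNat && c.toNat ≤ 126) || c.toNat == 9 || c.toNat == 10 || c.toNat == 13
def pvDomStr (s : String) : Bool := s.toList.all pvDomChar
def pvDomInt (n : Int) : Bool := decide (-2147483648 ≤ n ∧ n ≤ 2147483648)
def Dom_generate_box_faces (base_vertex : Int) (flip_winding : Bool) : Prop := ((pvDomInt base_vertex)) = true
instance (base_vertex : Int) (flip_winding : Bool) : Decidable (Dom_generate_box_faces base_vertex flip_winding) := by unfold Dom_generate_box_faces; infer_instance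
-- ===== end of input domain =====

-- B builds the 12 triangles from six quads by fan triangulation in one loop (simpler); return values proved equal.

-- ===== PORT A =====
def generate_box_faces (base_vertex : Int) (flip_winding : Bool) : List (Int × Int × Int × String) :=
  let B := base_vertex
  let faces : List (Int × Int × Int × String) := [
    (B+0, B+1, B+5, "front"),
    (B+0, B+5, B+4, "front"),
    (B+2, B+3, B+7, "back"),
    (B+2, B+7, B+6, "back"),
    (B+0, B+3, B+2, "top"),
    (B+0, B+2, B+1, "top"),
    (B+4, B+5, B+6, "bottom"),
    (B+4, B+6, B+7, "bottom"),
    (B+1, B+2, B+6, "right"),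
    (B+1, B+6, B+5, "right"),
    (B+0, B+4, B+7, "left"),
    (B+0, B+7, B+3, "left")]
  if flip_winding then
    faces.map (fun t => match t with | (i, j, k, name) => (i, k, j, name))
  else
    faces

-- ===== PORT B =====
def generate_box_faces_alt (base_vertex : Int) (flip_winding : Bool) : List (Int × Int × Int × String) :=
  let B := base_vertex
  let quads : List (Int × Int × Int × Int × String) := [
    (0, 1, 5, 4, "front"),
    (2, 3, 7, 6, "back"),
    (0, 3, 2, 1, "top"),
    (4, 5, 6, 7, "bottom"),
    (1, 2, 6, 5, "right"),
    (0, 4, 7, 3, "left")]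
  quads.foldl (fun faces q =>
    match q with
    | (a, b, c, d, name) =>
      if flip_winding then
        faces ++ [(B + a, B + c, B + b, name), (B + a, B + d, B + c, name)]
      else
        faces ++ [(B + a, B + b, B + c, name), (B + a, B + c, B + d, name)]) []

-- ===== PRECONDITION & SPEC =====
def Spec_generate_box_faces (base_vertex : Int) (flip_winding : Bool) (out : List (Int × Int × Int × String)) : Prop := out = generate_box_faces_alt base_vertex flip_winding
instance (base_vertex : Int) (flip_winding : Bool) (out : List (Int × Int × Int × String)) : Decidable (Spec_generate_box_faces base_vertex flip_winding out) := by unfold Spec_generate_box_faces; infer_instance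

-- ===== CLAIM (what is proved, stated in full; the proofs are below) =====
def Claim_equal_generate_box_faces : Prop := ∀ (base_vertex : Int) (flip_winding : Bool), Dom_generate_box_faces base_vertex flip_winding → Spec_generate_box_faces base_vertex flip_winding (generate_box_faces base_vertex flip_winding)

-- ===== LEMMAS AND PROOFS =====

-- ===== VERDICT (by name: the statement is the Claim_ definition above) =====
theorem generate_box_faces_spec : Claim_equal_generate_box_faces := by
  intro bv f _
  unfold Spec_generate_box_faces generate_box_faces generate_box_faces_alt
  cases f <;> simp
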